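-- pv_equiv track=rewrite | github.com/falcondai/lm-steganography | bucket.py | bitblock_to_tokens
-- ===== SOURCE A (Python) =====
-- def bitblock_to_tokens(vocab, N_blocks_length):
--     '''
--     Args:
--         vocab: vocabulary in a list [token1, token2, ..., tokenx]
--         N_blocks: number of bit blocks
--     Return:
--         bits2tokens: a dictionary {bit_block: token_list}
--         token2bits: a dictionary {token: it's bit_block}
--     '''
--     assert N_blocks_length < 8 # 2^10 is too large, each block contains too few tokens
--
--     N_blocks = 2 ** N_blocks_length
--     batch_size = len(vocab) // N_blocks
--
--     bits2tokens = {}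
--     token2bits = {}
--
--     for i in range(N_blocks-1):
--         format_str = '0'+str(N_blocks_length)+'b'
--         bits = format(i, format_str)
--         bits2tokens[bits] = vocab[i*batch_size: (i+1)*batch_size]
--     last_format_str = '0'+str(N_blocks_length)+'b'
--     last_bits = format(N_blocks - 1, last_format_str)
--     bits2tokens[last_bits] = vocab[(N_blocks-1)*batch_size:]
--     for key, tokens in bits2tokens.items():
--         for token in tokens:
--             token2bits[token] = key
--
--     return bits2tokens, token2bits
-- ===== SOURCE B (Python) =====
-- def bitblock_to_tokens(vocab, N_blocks_length):
--     '''Single pass over vocab: block index computed arithmetically per token.'''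
--     assert N_blocks_length < 8
--
--     N_blocks = 2 ** N_blocks_length
--     batch_size = len(vocab) // N_blocks
--     fmt = '0' + str(N_blocks_length) + 'b'
--
--     bits2tokens = {format(j, fmt): [] for j in range(N_blocks)}
--     token2bits = {}
--     for i, token in enumerate(vocab):
--         block = min(i // batch_size, N_blocks - 1) if batch_size > 0 else N_blocks - 1
--         bits = format(block, fmt)
--         bits2tokens[bits].append(token)
--         token2bits[token] = bits
--
--     return bits2tokens, token2bits
-- ===== Notes on version B (the rewrite author's own statement) =====
-- stated objective: alternative
-- what changed: B pre-initializes all 2^N_blocks_length bit-block keys to empty lists and then makes one pass over enumerate(vocab), computing each token's block index arithmetically (min(i//batch_size, N_blocks-1), or the last block when batch_size==0) and filling bits2tokens and token2bits simultaneously, instead of A's per-block slicing loop followed by a second nested pass that inverts the dict.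
import Mathlib
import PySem

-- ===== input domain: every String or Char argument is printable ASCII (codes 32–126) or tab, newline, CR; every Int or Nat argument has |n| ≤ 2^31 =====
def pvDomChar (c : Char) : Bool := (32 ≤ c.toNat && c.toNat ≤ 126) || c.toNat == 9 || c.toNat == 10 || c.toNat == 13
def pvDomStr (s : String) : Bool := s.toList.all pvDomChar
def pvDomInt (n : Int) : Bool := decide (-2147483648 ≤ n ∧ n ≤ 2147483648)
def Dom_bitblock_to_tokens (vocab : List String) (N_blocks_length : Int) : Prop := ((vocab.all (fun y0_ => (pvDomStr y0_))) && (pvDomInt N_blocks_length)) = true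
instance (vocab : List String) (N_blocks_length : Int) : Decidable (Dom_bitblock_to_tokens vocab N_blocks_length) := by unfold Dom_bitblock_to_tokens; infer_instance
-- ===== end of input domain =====

-- B replaces A's slice-per-block passes by one arithmetic single pass over vocab (objective: alternative single-pass decomposition).

-- Python's format(i, '0'+str(w)+'b'), exact for 0 ≤ i and 0 ≤ w (the only calls both ports make under Pre_);
-- shared by both ports because both Pythons call the same built-in `format`.
def binChars (n : Nat) : List Char :=
  if _h : n < 2 then (if n = 1 then ['1'] else ['0'])
  else binChars (n / 2) ++ [if n % 2 = 1 then '1' else '0']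
decreasing_by omega

def pyFormatBin (i w : Int) : String :=
  String.ofList (List.replicate (w.toNat - (binChars i.toNat).length) '0' ++ binChars i.toNat)

-- ===== PORT A =====
def bitblock_to_tokens (vocab : List String) (N_blocks_length : Int) : (List (String × List String)) × (List (String × String)) :=
  -- assert N_blocks_length < 8  (and 2 ** negative is a float, so range(...) raises): Pre_ excludes both
  let N_blocks : Int := 2 ^ N_blocks_length.toNat
  let batch_size : Int := PySem.Int.floordiv (vocab.length : Int) N_blocks
  let bits2tokens : PySem.Dict String (List String) :=
    (PySem.List.pyRange 0 (N_blocks - 1)).foldl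
      (fun d i => d.insert (pyFormatBin i N_blocks_length)
        (PySem.List.slice vocab (some (i * batch_size)) (some ((i + 1) * batch_size))))
      PySem.Dict.empty
  let bits2tokens := bits2tokens.insert (pyFormatBin (N_blocks - 1) N_blocks_length)
      (PySem.List.slice vocab (some ((N_blocks - 1) * batch_size)) none)
  let token2bits : PySem.Dict String String :=
    bits2tokens.items.foldl (fun d kt => kt.2.foldl (fun d t => d.insert t kt.1) d) PySem.Dict.empty
  (bits2tokens.items, token2bits.items)

-- ===== PORT B =====
def bitblock_to_tokens_alt (vocab : List String) (N_blocks_length : Int) : (List (String × List String)) × (List (String × String)) :=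
  let N_blocks : Int := 2 ^ N_blocks_length.toNat
  let batch_size : Int := PySem.Int.floordiv (vocab.length : Int) N_blocks
  let bits2tokens : PySem.Dict String (List String) :=
    (PySem.List.pyRange 0 N_blocks).foldl
      (fun d j => d.insert (pyFormatBin j N_blocks_length) []) PySem.Dict.empty
  let r :=
    (PySem.List.enumerate vocab).foldl
      (fun st p =>
        let block : Int := if batch_size > 0
          then min (PySem.Int.floordiv p.1 batch_size) (N_blocks - 1) else N_blocks - 1
        let bits := pyFormatBin block N_blocks_length
        (st.1.modify bits [] (fun l => l ++ [p.2]), st.2.insert p.2 bits))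
      (bits2tokens, (PySem.Dict.empty : PySem.Dict String String))
  (r.1.items, r.2.items)

-- ===== PRECONDITION & SPEC =====
-- Pre_ excludes exactly the inputs where the Python A raises: the assert fires for N_blocks_length ≥ 8,
-- and for N_blocks_length < 0 `2 ** N_blocks_length` is a float so `range(N_blocks-1)` raises TypeError.
def Pre_bitblock_to_tokens (vocab : List String) (N_blocks_length : Int) : Prop :=
  0 ≤ N_blocks_length ∧ N_blocks_length < 8
instance (vocab : List String) (N_blocks_length : Int) : Decidable (Pre_bitblock_to_tokens vocab N_blocks_length) := by unfold Pre_bitblock_to_tokens; infer_instance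
def pvWitness_bitblock_to_tokens : List String × Int := (["a", "b", "c"], 1)

def Spec_bitblock_to_tokens (vocab : List String) (N_blocks_length : Int) (out : (List (String × List String)) × (List (String × String))) : Prop := out = bitblock_to_tokens_alt vocab N_blocks_length
instance (vocab : List String) (N_blocks_length : Int) (out : (List (String × List String)) × (List (String × String))) : Decidable (Spec_bitblock_to_tokens vocab N_blocks_length out) := by unfold Spec_bitblock_to_tokens; infer_instance

-- ===== CLAIM (what is proved, stated in full; the proofs are below) =====
def Claim_equal_bitblock_to_tokens : Prop := ∀ (vocab : List String) (N_blocks_length : Int), Dom_bitblock_to_tokens vocab N_blocks_length → Pre_bitblock_to_tokens vocab N_blocks_length → Spec_bitblock_to_tokens vocab N_blocks_length (bitblock_to_tokens vocab N_blocks_length)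

-- ===== LEMMAS AND PROOFS =====

-- proof-only abbreviations for B's arithmetic block index and A's block slices
def pvBlk (bs N i : Int) : Int :=
  if bs > 0 then min (PySem.Int.floordiv i bs) (N - 1) else N - 1

def pvChunk (vocab : List String) (NN bsN j : Nat) : List String :=
  if j = NN - 1 then vocab.drop (j * bsN) else (vocab.drop (j * bsN)).take bsN

-- the binary value a padded binary string denotes (proof-only; inverse of pyFormatBin)
def pvBinVal (l : List Char) : Nat := l.foldl (fun a c => 2 * a + (if c = '1' then 1 else 0)) 0

lemma binChars_foldl (n : Nat) : ∀ a : Nat,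
    (binChars n).foldl (fun a c => 2 * a + (if c = '1' then 1 else 0)) a
      = a * 2 ^ (binChars n).length + n := by
  induction n using Nat.strong_induction_on with
  | _ n ih =>
    intro a
    rw [binChars]
    by_cases h : n < 2
    · simp only [h, dite_true]
      interval_cases n <;> simp <;> ring
    · simp only [h, dite_false]
      rw [List.foldl_append, ih (n / 2) (by omega)]
      have hm : 2 * (n / 2) + n % 2 = n := by omega
      rcases Nat.mod_two_eq_zero_or_one n with hp | hp <;>
        simp [hp, List.length_append, pow_succ] <;> ring_nf <;> omega


lemma replicate_zero_foldl (p a : Nat) :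
    (List.replicate p '0').foldl (fun a c => 2 * a + (if c = '1' then 1 else 0)) a = a * 2 ^ p := by
  induction p generalizing a with
  | zero => simp
  | succ p ih =>
    rw [List.replicate_succ, List.foldl_cons]
    rw [if_neg (by decide : ¬ ('0' : Char) = '1'), ih]
    ring


lemma pyFormatBin_val (i w : Int) : pvBinVal (pyFormatBin i w).toList = i.toNat := by
  simp [pyFormatBin, pvBinVal, List.foldl_append, replicate_zero_foldl, binChars_foldl]


lemma pyFormatBin_inj (w : Int) {i j : Int} (hi : 0 ≤ i) (hj : 0 ≤ j)
    (h : pyFormatBin i w = pyFormatBin j w) : i = j := by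
  have := congrArg (fun s => pvBinVal s.toList) h
  simp only [pyFormatBin_val] at this
  omega


lemma pvBlk_mid (NN bsN j i : Nat) (h1 : j + 1 ≤ NN) (h2 : j * bsN ≤ i) (h3 : i < (j + 1) * bsN) :
    pvBlk (bsN : Int) (NN : Int) (i : Int) = (j : Int) := by
  have hb : 0 < bsN := by
    rcases Nat.eq_zero_or_pos bsN with h | h
    · subst h; simp at h3
    · exact h
  have hb' : (0 : Int) < (bsN : Int) := by exact_mod_cast hb
  unfold pvBlk
  rw [if_pos hb', PySem.Int.floordiv_natCast, Nat.div_eq_of_lt_le h2 h3]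
  have : (j : Int) ≤ (NN : Int) - 1 := by omega
  exact min_eq_left this


lemma pvBlk_top (NN bsN i : Nat) (hN : 1 ≤ NN) (h : (NN - 1) * bsN ≤ i) :
    pvBlk (bsN : Int) (NN : Int) (i : Int) = ((NN - 1 : Nat) : Int) := by
  unfold pvBlk
  by_cases hb : 0 < bsN
  · rw [if_pos (by exact_mod_cast hb), PySem.Int.floordiv_natCast]
    have hle : NN - 1 ≤ i / bsN := (Nat.le_div_iff_mul_le hb).mpr h
    have : ((NN : Int) - 1) ≤ ((i / bsN : Nat) : Int) := by omega
    rw [min_eq_right this]; omega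
  · rw [if_neg (by omega : ¬ (0 : Int) < (bsN : Int))]; omega


lemma pvBlk_mem (NN bsN i : Nat) (hN : 1 ≤ NN) :
    pvBlk (bsN : Int) (NN : Int) (i : Int) ∈ PySem.List.pyRange 0 (NN : Int) := by
  rw [PySem.List.mem_pyRange_one]
  unfold pvBlk
  by_cases hb : (0 : Int) < (bsN : Int)
  · rw [if_pos hb, PySem.Int.floordiv_natCast]
    constructor
    · rcases le_total ((i / bsN : Nat) : Int) ((NN : Int) - 1) with h | h
      · rw [min_eq_left h]; exact_mod_cast Nat.zero_le _
      · rw [min_eq_right h]; omega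
    · exact lt_of_le_of_lt (min_le_right _ _) (by omega)
  · rw [if_neg hb]; omega


lemma enum_map_const (nbl bs N : Int) (l : List String) (s : Nat) (C : Int)
    (h : ∀ i : Nat, s ≤ i → i < s + l.length → pvBlk bs N (i : Int) = C) :
    (PySem.List.enumerate l (s : Int)).map (fun p => (pyFormatBin (pvBlk bs N p.1) nbl, p.2))
      = l.map (fun t => (pyFormatBin C nbl, t)) := by
  induction l generalizing s with
  | nil => simp [PySem.List.enumerate_nil]
  | cons x xs ih =>
    rw [PySem.List.enumerate_cons, List.map_cons, List.map_cons]
    congr 1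
    · simp only
      rw [h s (le_refl s) (by simp)]
    · have : ((s : Int) + 1) = ((s + 1 : Nat) : Int) := by push_cast; ring
      rw [this, ih (s + 1) (fun i h1 h2 => h i (by omega) (by simp at h2 ⊢; omega))]


-- the central decomposition: B's single pass, read off chunk by chunk
lemma pairs_eq (vocab : List String) (nbl : Int) (NN bsN : Nat) (hN : 1 ≤ NN)
    (hle : NN * bsN ≤ vocab.length) :
    ∀ k j : Nat, j + 1 + k = NN →
    (PySem.List.enumerate (vocab.drop (j * bsN)) ((j * bsN : Nat) : Int)).map
        (fun p => (pyFormatBin (pvBlk (bsN : Int) (NN : Int) p.1) nbl, p.2))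
      = (List.range' j (k + 1)).flatMap
        (fun q => (pvChunk vocab NN bsN q).map (fun t => (pyFormatBin (q : Int) nbl, t))) := by
  intro k
  induction k with
  | zero =>
    intro j hj
    have hj' : j = NN - 1 := by omega
    subst hj'
    rw [List.range'_one, List.flatMap_cons, List.flatMap_nil, List.append_nil]
    rw [pvChunk, if_pos rfl]
    exact enum_map_const nbl _ _ _ _ _
      (fun i h1 _h2 => pvBlk_top NN bsN i hN (le_trans (le_refl _) h1))
  | succ k ih =>
    intro j hj
    have hjN : j + 1 ≤ NN := by omega
    have hj1 : (j + 1) * bsN ≤ vocab.length :=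
      le_trans (Nat.mul_le_mul_right bsN hjN) hle
    have hsplit : vocab.drop (j * bsN)
        = (vocab.drop (j * bsN)).take bsN ++ vocab.drop ((j + 1) * bsN) := by
      conv_lhs => rw [← List.take_append_drop bsN (vocab.drop (j * bsN))]
      congr 1
      rw [List.drop_drop]
      congr 1
      ring
    have hj1' : j * bsN + bsN ≤ vocab.length := by rw [Nat.succ_mul] at hj1; omega
    have hlen : ((vocab.drop (j * bsN)).take bsN).length = bsN := by
      rw [List.length_take, List.length_drop]
      omega
    conv_lhs => rw [hsplit]
    rw [PySem.List.enumerate_append, List.map_append, hlen]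
    have hcast : ((j * bsN : Nat) : Int) + ((bsN : Nat) : Int) = (((j + 1) * bsN : Nat) : Int) := by
      push_cast; ring
    rw [hcast]
    rw [List.range'_succ, List.flatMap_cons]
    congr 1
    · rw [pvChunk, if_neg (by omega : ¬ j = NN - 1)]
      refine enum_map_const nbl _ _ _ _ _ (fun i h1 h2 => ?_)
      refine pvBlk_mid NN bsN j i hjN h1 ?_
      rw [hlen] at h2
      rw [Nat.succ_mul]
      omega
    · exact ih (j + 1) (by omega)


lemma set_update_of_subset {κ : Type} [BEq κ] [LawfulBEq κ] (s : PySem.Set κ) (l : List κ)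
    (h : ∀ x ∈ l, x ∈ s) : PySem.Set.update s l = s := by
  induction l generalizing s with
  | nil => rfl
  | cons x xs ih =>
    have hx : PySem.Set.add s x = s := by
      simp [PySem.Set.add, PySem.Set.contains, h x (by simp)]
    show PySem.Set.update (PySem.Set.add s x) xs = s
    rw [hx]
    exact ih s (fun y hy => h y (by simp [hy]))


lemma flatMap_ite_single {α β : Type} [DecidableEq α] (l : List α) (j : α) (g : α → List β)
    (hn : l.Nodup) (hj : j ∈ l) :
    (l.flatMap fun q => if q = j then g q else []) = g j := by
  induction l with
  | nil => simp at hj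
  | cons a t ih =>
    rw [List.flatMap_cons]
    rcases List.nodup_cons.mp hn with ⟨ha, ht⟩
    by_cases haj : a = j
    · subst haj
      rw [if_pos rfl]
      have : (t.flatMap fun q => if q = a then g q else []) = [] := by
        rw [List.flatMap_eq_nil_iff]
        intro q hq
        rw [if_neg (by rintro rfl; exact ha hq)]
      rw [this, List.append_nil]
    · rw [if_neg haj, List.nil_append]
      rcases List.mem_cons.mp hj with h | h
      · exact absurd h.symm haj
      · exact ih ht h


lemma filter_flatMap {α β : Type} (l : List α) (g : α → List β) (p : β → Bool) :
    (l.flatMap g).filter p = l.flatMap (fun a => (g a).filter p) := by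
  induction l with
  | nil => simp
  | cons a t ih => simp [List.flatMap_cons, List.filter_append, ih]


lemma foldl_nested_insert {α β : Type} [BEq α] (l : List (β × List α)) (d0 : PySem.Dict α β) :
    l.foldl (fun d kt => kt.2.foldl (fun d t => d.insert t kt.1) d) d0
      = (l.flatMap fun kt => kt.2.map (fun t => (t, kt.1))).foldl
          (fun d p => d.insert p.1 p.2) d0 := by
  induction l generalizing d0 with
  | nil => rfl
  | cons kt t ih =>
    rw [List.foldl_cons, List.flatMap_cons, List.foldl_append, ih, List.foldl_map]


-- normal form both programs are reduced to
def pvNorm (vocab : List String) (nbl : Int) (NN bsN : Nat) :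
    (List (String × List String)) × (List (String × String)) :=
  ((List.range NN).map (fun (j : Nat) => (pyFormatBin (j : Int) nbl, pvChunk vocab NN bsN j)),
   (((List.range NN).flatMap
        (fun (j : Nat) => (pvChunk vocab NN bsN j).map (fun t => (t, pyFormatBin (j : Int) nbl)))).foldl
      (fun d p => d.insert p.1 p.2) (PySem.Dict.empty : PySem.Dict String String)).items)

lemma A_norm (vocab : List String) (nbl : Int) (_h0 : 0 ≤ nbl) :
    bitblock_to_tokens vocab nbl
      = pvNorm vocab nbl (2 ^ nbl.toNat) (vocab.length / 2 ^ nbl.toNat) := by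
  have hN : 1 ≤ 2 ^ nbl.toNat := Nat.one_le_two_pow
  set NN : Nat := 2 ^ nbl.toNat with hNN
  set bsN : Nat := vocab.length / NN with hbsN
  have hNc : ((2 : Int) ^ nbl.toNat) = (NN : Int) := by rw [hNN]; push_cast; ring
  simp only [bitblock_to_tokens, hNc, PySem.Int.floordiv_natCast, ← hbsN]
  -- the N-1 fresh inserts of the loop
  have hnodup1 : ((PySem.List.pyRange 0 ((NN : Int) - 1)).map (fun i => pyFormatBin i nbl)).Nodup :=
    List.Nodup.map_on
      (fun x hx y hy hxy => pyFormatBin_inj nbl (PySem.List.mem_pyRange_one.mp hx).1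
        (PySem.List.mem_pyRange_one.mp hy).1 hxy)
      (PySem.List.nodup_pyRange_one _ _)
  have h1 := PySem.Dict.items_foldl_insert_fresh (PySem.List.pyRange 0 ((NN : Int) - 1))
      (fun i => pyFormatBin i nbl)
      (fun i => PySem.List.slice vocab (some (i * (bsN : Int))) (some ((i + 1) * (bsN : Int))))
      PySem.Dict.empty (fun a _ => PySem.Dict.contains_empty _) hnodup1
  rw [show (PySem.Dict.empty : PySem.Dict String (List String)).items = [] from rfl,
      List.nil_append] at h1
  -- the final insert is fresh too
  have hcont : (List.foldl
        (fun d i => d.insert (pyFormatBin i nbl)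
          (PySem.List.slice vocab (some (i * (bsN : Int))) (some ((i + 1) * (bsN : Int)))))
        PySem.Dict.empty (PySem.List.pyRange 0 ((NN : Int) - 1))).contains
        (pyFormatBin ((NN : Int) - 1) nbl) = false := by
    rw [PySem.Dict.contains_eq_decide_mem_keys, decide_eq_false_iff_not]
    intro hmem
    rw [show (List.foldl
        (fun d i => d.insert (pyFormatBin i nbl)
          (PySem.List.slice vocab (some (i * (bsN : Int))) (some ((i + 1) * (bsN : Int)))))
        PySem.Dict.empty (PySem.List.pyRange 0 ((NN : Int) - 1))).keys
        = (List.foldl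
        (fun d i => d.insert (pyFormatBin i nbl)
          (PySem.List.slice vocab (some (i * (bsN : Int))) (some ((i + 1) * (bsN : Int)))))
        PySem.Dict.empty (PySem.List.pyRange 0 ((NN : Int) - 1))).items.map (fun p => p.1) from rfl,
        h1, List.map_map] at hmem
    rcases List.mem_map.mp hmem with ⟨i, hi, hik⟩
    rcases PySem.List.mem_pyRange_one.mp hi with ⟨hi0, hilt⟩
    have := pyFormatBin_inj nbl (by omega : (0:Int) ≤ (NN : Int) - 1) hi0 hik.symm
    omega
  have h2 := PySem.Dict.items_insert_of_not_contains _
      (PySem.List.slice vocab (some (((NN : Int) - 1) * (bsN : Int))) none) hcont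
  rw [h1] at h2
  -- convert pyRange to List.range and slices to pvChunk
  have hr : PySem.List.pyRange 0 ((NN : Int) - 1) = (List.range (NN - 1)).map (fun k : Nat => (k : Int)) := by
    rw [PySem.List.pyRange_one]
    have : ((NN : Int) - 1 - 0).toNat = NN - 1 := by omega
    rw [this]
    exact List.map_congr_left (fun a _ => by simp)
  have hmap1 : (PySem.List.pyRange 0 ((NN : Int) - 1)).map
        (fun i => (pyFormatBin i nbl, PySem.List.slice vocab (some (i * (bsN : Int))) (some ((i + 1) * (bsN : Int)))))
      = (List.range (NN - 1)).map (fun j : Nat => (pyFormatBin (j : Int) nbl, pvChunk vocab NN bsN j)) := by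
    rw [hr, List.map_map]
    refine List.map_congr_left (fun k hk => ?_)
    have hk' : k < NN - 1 := List.mem_range.mp hk
    simp only [Function.comp]
    congr 1
    have e1 : ((k : Int) * (bsN : Int)) = ((k * bsN : Nat) : Int) := by push_cast; ring
    have e2 : (((k : Int) + 1) * (bsN : Int)) = ((k * bsN : Nat) : Int) + ((bsN : Nat) : Int) := by push_cast; ring
    rw [e1, e2, PySem.List.slice_natCast_add, pvChunk, if_neg (by omega : ¬ k = NN - 1)]
  have hlast : (pyFormatBin ((NN : Int) - 1) nbl,
        PySem.List.slice vocab (some (((NN : Int) - 1) * (bsN : Int))) none)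
      = (pyFormatBin ((NN - 1 : Nat) : Int) nbl, pvChunk vocab NN bsN (NN - 1)) := by
    have hc1 : ((NN : Int) - 1) = ((NN - 1 : Nat) : Int) := by omega
    rw [hc1]
    congr 1
    have e1 : (((NN - 1 : Nat) : Int) * (bsN : Int)) = (((NN - 1) * bsN : Nat) : Int) := by push_cast; ring
    rw [e1, PySem.List.slice_from_natCast, pvChunk, if_pos rfl]
  rw [hmap1, hlast] at h2
  have hrangesplit : List.range NN = List.range (NN - 1) ++ [NN - 1] := by
    conv_lhs => rw [show NN = (NN - 1) + 1 by omega]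
    rw [List.range_succ]
  have h3 : ∀ (X : PySem.Dict String (List String)), X.items = (List.range (NN - 1)).map (fun j : Nat => (pyFormatBin (j : Int) nbl, pvChunk vocab NN bsN j)) ++ [(pyFormatBin ((NN - 1 : Nat) : Int) nbl, pvChunk vocab NN bsN (NN - 1))] → X.items = (List.range NN).map (fun j : Nat => (pyFormatBin (j : Int) nbl, pvChunk vocab NN bsN j)) := by
    intro X hX
    rw [hX, hrangesplit, List.map_append, List.map_singleton]
  have hitems := h3 _ h2
  rw [hitems]
  unfold pvNorm
  rw [Prod.mk.injEq]
  refine ⟨rfl, ?_⟩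
  rw [foldl_nested_insert, List.flatMap_map]

lemma B_norm (vocab : List String) (nbl : Int) (_h0 : 0 ≤ nbl) :
    bitblock_to_tokens_alt vocab nbl
      = pvNorm vocab nbl (2 ^ nbl.toNat) (vocab.length / 2 ^ nbl.toNat) := by
  have hN : 1 ≤ 2 ^ nbl.toNat := Nat.one_le_two_pow
  set NN : Nat := 2 ^ nbl.toNat with hNN
  set bsN : Nat := vocab.length / NN with hbsN
  have hNc : ((2 : Int) ^ nbl.toNat) = (NN : Int) := by rw [hNN]; push_cast; ring
  have hle : NN * bsN ≤ vocab.length := by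
    rw [hbsN, Nat.mul_comm]
    exact Nat.div_mul_le_self _ _
  simp only [bitblock_to_tokens_alt, hNc, PySem.Int.floordiv_natCast, ← hbsN]
  have hblk : ∀ i : Int,
      (if (0 : Int) < (bsN : Int) then min (PySem.Int.floordiv i (bsN : Int)) ((NN : Int) - 1)
       else (NN : Int) - 1) = pvBlk (bsN : Int) (NN : Int) i := fun i => rfl
  simp only [hblk]
  rw [PySem.List.foldl_prod_mk
      (f := fun (d : PySem.Dict String (List String)) (p : Int × String) =>
        d.modify (pyFormatBin (pvBlk (bsN : Int) (NN : Int) p.1) nbl) [] (fun l => l ++ [p.2]))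
      (g := fun (d : PySem.Dict String String) (p : Int × String) =>
        d.insert p.2 (pyFormatBin (pvBlk (bsN : Int) (NN : Int) p.1) nbl))]
  -- init dict: all N fresh keys, empty lists
  have hnodupK : ((PySem.List.pyRange 0 (NN : Int)).map (fun j => pyFormatBin j nbl)).Nodup :=
    List.Nodup.map_on
      (fun x hx y hy hxy => pyFormatBin_inj nbl (PySem.List.mem_pyRange_one.mp hx).1
        (PySem.List.mem_pyRange_one.mp hy).1 hxy)
      (PySem.List.nodup_pyRange_one _ _)
  have hinit := PySem.Dict.items_foldl_insert_fresh (PySem.List.pyRange 0 (NN : Int))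
      (fun j => pyFormatBin j nbl) (fun _ => ([] : List String))
      PySem.Dict.empty (fun a _ => PySem.Dict.contains_empty _) hnodupK
  rw [show (PySem.Dict.empty : PySem.Dict String (List String)).items = [] from rfl,
      List.nil_append] at hinit
  set init : PySem.Dict String (List String) :=
    (PySem.List.pyRange 0 (NN : Int)).foldl (fun d j => d.insert (pyFormatBin j nbl) []) PySem.Dict.empty with hinitdef
  have hkeysinit : init.keys = (PySem.List.pyRange 0 (NN : Int)).map (fun j => pyFormatBin j nbl) := by
    rw [show init.keys = init.items.map (fun p => p.1) from rfl, hinit, List.map_map]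
    exact List.map_congr_left (fun a _ => rfl)
  have hnodupinit : init.keys.Nodup := by rw [hkeysinit]; exact hnodupK
  -- the central pass, as a list of (bits, token) pairs
  have hpairs := pairs_eq vocab nbl NN bsN hN hle (NN - 1) 0 (by omega)
  rw [Nat.zero_mul, List.drop_zero, Nat.cast_zero,
      show (NN - 1) + 1 = NN by omega, ← List.range_eq_range'] at hpairs
  unfold pvNorm
  rw [Prod.mk.injEq]
  constructor
  · -- bits2tokens component
    set d : PySem.Dict String (List String) :=
      (PySem.List.enumerate vocab).foldl
        (fun d p => d.modify (pyFormatBin (pvBlk (bsN : Int) (NN : Int) p.1) nbl) [] (fun l => l ++ [p.2])) init with hddef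
    have hkeysd : d.keys = init.keys := by
      rw [hddef, PySem.Dict.keys_foldl_modify_key (PySem.List.enumerate vocab)
            (fun p => pyFormatBin (pvBlk (bsN : Int) (NN : Int) p.1) nbl) []
            (fun _ p => fun l => l ++ [p.2]) init]
      refine set_update_of_subset _ _ (fun x hx => ?_)
      rcases List.mem_map.mp hx with ⟨p, hp, hpx⟩
      rcases (PySem.List.mem_enumerate_iff vocab 0 p).mp hp with ⟨k, hk, hpk⟩
      rw [hkeysinit]
      refine List.mem_map.mpr ⟨pvBlk (bsN : Int) (NN : Int) p.1, ?_, hpx⟩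
      rw [hpk]
      simp only [Int.zero_add]
      exact pvBlk_mem NN bsN k hN
    have hnodupd : d.keys.Nodup := by rw [hkeysd]; exact hnodupinit
    have hitemsd : d.items = d.keys.map (fun k => (k, d.getD k [])) :=
      PySem.Dict.items_eq_map_keys d hnodupd []
    have hrN : PySem.List.pyRange 0 (NN : Int) = (List.range NN).map (fun k : Nat => (k : Int)) := by
      rw [PySem.List.pyRange_one]
      have : ((NN : Int) - 0).toNat = NN := by omega
      rw [this]
      exact List.map_congr_left (fun a _ => by simp)
    have hgetD : ∀ jn : Nat, jn < NN → d.getD (pyFormatBin (jn : Int) nbl) [] = pvChunk vocab NN bsN jn := by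
      intro jn hjn
      have hfold : d = ((PySem.List.enumerate vocab).map
            (fun p => (pyFormatBin (pvBlk (bsN : Int) (NN : Int) p.1) nbl, p.2))).foldl
            (fun d q => d.modify q.1 [] (fun l => l ++ [q.2])) init := by
        rw [hddef, List.foldl_map]
      rw [hfold, PySem.Dict.getD_foldl_modify_append]
      have hinitgetD : init.getD (pyFormatBin (jn : Int) nbl) [] = [] := by
        refine PySem.Dict.getD_of_mem_items init ?_ hnodupinit []
        rw [hinit]
        exact List.mem_map.mpr ⟨(jn : Int),
          PySem.List.mem_pyRange_one.mpr ⟨by omega, by exact_mod_cast hjn⟩, rfl⟩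
      rw [hinitgetD, List.nil_append, hpairs, filter_flatMap]
      have hper : ∀ q : Nat,
          ((pvChunk vocab NN bsN q).map (fun t => (pyFormatBin (q : Int) nbl, t))).filter
              (fun p => p.1 == pyFormatBin (jn : Int) nbl)
            = if q = jn then (pvChunk vocab NN bsN q).map (fun t => (pyFormatBin (q : Int) nbl, t)) else [] := by
        intro q
        rw [List.filter_map]
        by_cases hq : q = jn
        · subst hq
          rw [if_pos rfl]
          congr 1
          refine List.filter_eq_self.mpr (fun t _ => ?_)
          simp
        · rw [if_neg hq]
          have hne : ¬ (pyFormatBin (q : Int) nbl = pyFormatBin (jn : Int) nbl) := by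
            intro h
            exact hq (by exact_mod_cast pyFormatBin_inj nbl (by omega) (by omega) h)
          have : List.filter ((fun p => p.1 == pyFormatBin (jn : Int) nbl) ∘
              (fun t => (pyFormatBin (q : Int) nbl, t))) (pvChunk vocab NN bsN q) = [] := by
            refine List.filter_eq_nil_iff.mpr (fun t _ => ?_)
            simpa using hne
          rw [this, List.map_nil]
      simp only [hper]
      rw [flatMap_ite_single (List.range NN) jn _ (List.nodup_range) (List.mem_range.mpr hjn),
          List.map_map]
      simp
    rw [hitemsd, hkeysd, hkeysinit, hrN, List.map_map, List.map_map]
    refine List.map_congr_left (fun jn hjn => ?_)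
    simp only [Function.comp]
    rw [hgetD jn (List.mem_range.mp hjn)]
  · -- token2bits component
    show ((PySem.List.enumerate vocab).foldl
        (fun (d : PySem.Dict String String) p => d.insert p.2 (pyFormatBin (pvBlk (bsN : Int) (NN : Int) p.1) nbl))
        PySem.Dict.empty).items = _
    have hfold2 : (PySem.List.enumerate vocab).foldl
          (fun (d : PySem.Dict String String) p => d.insert p.2 (pyFormatBin (pvBlk (bsN : Int) (NN : Int) p.1) nbl))
          PySem.Dict.empty
        = ((PySem.List.enumerate vocab).map
            (fun p => (p.2, pyFormatBin (pvBlk (bsN : Int) (NN : Int) p.1) nbl))).foldl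
            (fun d q => d.insert q.1 q.2) PySem.Dict.empty := by
      rw [List.foldl_map]
    rw [hfold2]
    congr 1
    have hswap : (PySem.List.enumerate vocab).map
          (fun p => (p.2, pyFormatBin (pvBlk (bsN : Int) (NN : Int) p.1) nbl))
        = ((PySem.List.enumerate vocab).map
            (fun p => (pyFormatBin (pvBlk (bsN : Int) (NN : Int) p.1) nbl, p.2))).map Prod.swap := by
      rw [List.map_map]
      exact List.map_congr_left (fun p _ => rfl)
    rw [hswap, hpairs, List.map_flatMap]
    refine congrArg _ ?_
    refine List.flatMap_congr (fun q _ => ?_)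
    rw [List.map_map]
    exact List.map_congr_left (fun t _ => rfl)

-- ===== VERDICT (by name: the statement is the Claim_ definition above) =====
theorem bitblock_to_tokens_spec : Claim_equal_bitblock_to_tokens := by
  intro vocab nbl _hdom hpre
  unfold Spec_bitblock_to_tokens
  rw [A_norm vocab nbl hpre.1, B_norm vocab nbl hpre.1]
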